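-- pv_equiv track=rewrite | github.com/binary-h0/problem-solve-book | problem_list/14500.py | tetromino_I
-- ===== SOURCE A (Python) =====
-- def tetromino_I(N, M, arr):
--     ans = 0
--     for i in range(N):
--         for j in range(M - 3):
--             sum = 0
--             for k in range(j, j + 4):
--                 sum += arr[i][k]
--             ans = max(ans, sum)
--
--     for i in range(N - 3):
--         for j in range(M):
--             sum = 0
--             for k in range(i, i + 4):
--                 sum += arr[k][j]
--             ans = max(ans, sum)
--
--     return ans
-- ===== SOURCE B (Python) =====
-- def tetromino_I(N, M, arr):
--     # Prefix-sum reimplementation: row prefix sums R and column prefix sums C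
--     # replace the inner 4-element summation loops with O(1) lookups.
--     if N <= 0:
--         return 0
--     R = []
--     for i in range(N):
--         row = arr[i]
--         p = [0]
--         s = 0
--         for j in range(M):
--             s += row[j]
--             p.append(s)
--         R.append(p)
--
--     cur = [0] * M
--     C = [cur]
--     for i in range(N):
--         row = arr[i]
--         cur = [cur[j] + row[j] for j in range(M)]
--         C.append(cur)
--
--     ans = 0
--     for i in range(N):
--         Ri = R[i]
--         for j in range(M - 3):
--             ans = max(ans, Ri[j + 4] - Ri[j])
--     for i in range(N - 3):
--         for j in range(M):
--             ans = max(ans, C[i + 4][j] - C[i][j])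
--     return ans
-- ===== Notes on version B (the rewrite author's own statement) =====
-- stated objective: faster
-- what changed: Builds row and column prefix-sum tables in one pass each, then computes every length-4 window as a difference of two prefix sums, eliminating A's inner 4-element summation loops.
-- outside the precondition, e.g. on tetromino_I(2, 2, []): A returns 0, B raises IndexError; on tetromino_I(1, 2, [[5]]): A returns 0, B raises IndexError
import Mathlib
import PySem

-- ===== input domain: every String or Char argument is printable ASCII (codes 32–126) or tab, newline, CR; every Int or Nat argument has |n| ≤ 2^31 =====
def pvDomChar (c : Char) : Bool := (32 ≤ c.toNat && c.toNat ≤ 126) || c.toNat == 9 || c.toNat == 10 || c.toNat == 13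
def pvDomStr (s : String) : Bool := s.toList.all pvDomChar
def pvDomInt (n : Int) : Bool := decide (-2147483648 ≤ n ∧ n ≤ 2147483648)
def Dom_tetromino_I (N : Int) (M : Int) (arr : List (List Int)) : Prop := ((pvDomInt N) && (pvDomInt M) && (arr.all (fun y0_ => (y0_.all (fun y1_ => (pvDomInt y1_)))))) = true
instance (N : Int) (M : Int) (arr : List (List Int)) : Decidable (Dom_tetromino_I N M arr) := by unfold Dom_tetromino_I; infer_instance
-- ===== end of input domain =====

-- B replaces A's inner 4-element summation loops by row/column prefix-sum tables
-- built in one pass, each window becoming a difference of two table entries.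

-- ===== PORT A =====
def tetromino_I (N : Int) (M : Int) (arr : List (List Int)) : Int :=
  let ans1 := (PySem.List.pyRange 0 N 1).foldl (fun ans i =>
    (PySem.List.pyRange 0 (M - 3) 1).foldl (fun ans j =>
      let s := (PySem.List.pyRange j (j + 4) 1).foldl
        (fun s k => s + PySem.List.pyGetD (PySem.List.pyGetD arr i []) k 0) 0
      max ans s) ans) 0
  (PySem.List.pyRange 0 (N - 3) 1).foldl (fun ans i =>
    (PySem.List.pyRange 0 M 1).foldl (fun ans j =>
      let s := (PySem.List.pyRange i (i + 4) 1).foldl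
        (fun s k => s + PySem.List.pyGetD (PySem.List.pyGetD arr k []) j 0) 0
      max ans s) ans) ans1

-- ===== PORT B =====
def tetromino_I_alt (N : Int) (M : Int) (arr : List (List Int)) : Int :=
  if N ≤ 0 then 0 else
  let R : List (List Int) := (PySem.List.pyRange 0 N 1).foldl (fun R i =>
    let row := PySem.List.pyGetD arr i []
    let p := (PySem.List.pyRange 0 M 1).foldl
      (fun (p : List Int × Int) j => (p.1 ++ [p.2 + PySem.List.pyGetD row j 0],
                                      p.2 + PySem.List.pyGetD row j 0)) ([0], 0)
    R ++ [p.1]) []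
  let C : List (List Int) × List Int := (PySem.List.pyRange 0 N 1).foldl
    (fun (C : List (List Int) × List Int) i =>
      let row := PySem.List.pyGetD arr i []
      let cur := (PySem.List.pyRange 0 M 1).map
        (fun j => PySem.List.pyGetD C.2 j 0 + PySem.List.pyGetD row j 0)
      (C.1 ++ [cur], cur)) ([List.replicate M.toNat 0], List.replicate M.toNat 0)
  let ans1 := (PySem.List.pyRange 0 N 1).foldl (fun ans i =>
    let Ri := PySem.List.pyGetD R i []
    (PySem.List.pyRange 0 (M - 3) 1).foldl (fun ans j =>
      max ans (PySem.List.pyGetD Ri (j + 4) 0 - PySem.List.pyGetD Ri j 0)) ans) 0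
  (PySem.List.pyRange 0 (N - 3) 1).foldl (fun ans i =>
    (PySem.List.pyRange 0 M 1).foldl (fun ans j =>
      max ans (PySem.List.pyGetD (PySem.List.pyGetD C.1 (i + 4) []) j 0
             - PySem.List.pyGetD (PySem.List.pyGetD C.1 i []) j 0)) ans) ans1

-- ===== PRECONDITION & SPEC =====
-- Pre_: arr has at least N rows and each of the first N rows has at least M cells.
-- Outside it either A raises IndexError, or (when A's guarded loops never index at
-- all, e.g. M ≤ 3 and N ≤ 3) B's unconditional table-building pass reads the first N
-- rows that A never touches and raises IndexError while A returns 0 — those inputs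
-- are excluded because B itself raises there.
def Pre_tetromino_I (N : Int) (M : Int) (arr : List (List Int)) : Prop :=
  N ≤ (arr.length : Int) ∧ ∀ row ∈ arr.take N.toNat, M ≤ (row.length : Int)
instance (N : Int) (M : Int) (arr : List (List Int)) : Decidable (Pre_tetromino_I N M arr) := by unfold Pre_tetromino_I; infer_instance
def pvWitness_tetromino_I : Int × Int × List (List Int) :=
  (4, 4, [[1, 2, 3, 4], [5, 6, 7, 8], [0, -1, -2, -3], [2, 2, 2, 2]])

def Spec_tetromino_I (N : Int) (M : Int) (arr : List (List Int)) (out : Int) : Prop := out = tetromino_I_alt N M arr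
instance (N : Int) (M : Int) (arr : List (List Int)) (out : Int) : Decidable (Spec_tetromino_I N M arr out) := by unfold Spec_tetromino_I; infer_instance

-- ===== CLAIM (what is proved, stated in full; the proofs are below) =====
def Claim_equal_tetromino_I : Prop := ∀ (N : Int) (M : Int) (arr : List (List Int)), Dom_tetromino_I N M arr → Pre_tetromino_I N M arr → Spec_tetromino_I N M arr (tetromino_I N M arr)

-- ===== LEMMAS AND PROOFS =====

-- the list of prefix sums [sum of first 0, 1, …, row.length elements]
def pvPrefixes (row : List Int) : List Int :=
  (List.range (row.length + 1)).map (fun k => (row.take k).sum)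

-- column sums of the first rows: entry k is the sum of column k over `rows`
def pvColOf (rows : List (List Int)) (m : Nat) : List Int :=
  (List.range m).map (fun k => (rows.map (fun r => r.getD k 0)).sum)

lemma pv_pfx_fold (row : List Int) (acc : List Int) (s : Int) :
    row.foldl (fun (p : List Int × Int) x => (p.1 ++ [p.2 + x], p.2 + x)) (acc, s)
    = (acc ++ (List.range row.length).map (fun k => s + (row.take (k + 1)).sum), s + row.sum) := by
  induction row generalizing acc s with
  | nil => simp
  | cons x xs ih =>
      simp only [List.foldl_cons, ih, List.length_cons, List.range_succ_eq_map,
        List.map_cons, List.map_map, List.sum_cons, List.take_succ_cons, List.take_zero,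
        List.sum_nil, List.append_assoc, List.singleton_append, Function.comp_def]
      simp [add_assoc, Nat.succ_eq_add_one]

lemma pv_pfx_eq (row : List Int) :
    row.foldl (fun (p : List Int × Int) x => (p.1 ++ [p.2 + x], p.2 + x)) ([0], 0)
    = (pvPrefixes row, row.sum) := by
  rw [pv_pfx_fold, pvPrefixes]
  simp [List.range_succ_eq_map, List.map_map, Function.comp_def]

lemma pv_sum_take_succ (l : List Int) (k : Nat) (h : k < l.length) :
    (l.take (k + 1)).sum = (l.take k).sum + l.getD k 0 := by
  rw [List.take_add_one, List.getElem?_eq_getElem h, List.sum_append]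
  simp [List.getD_eq_getElem?_getD, List.getElem?_eq_getElem h]

lemma pv_sum_map_take_succ (l : List (List Int)) (f : List Int → Int) (k : Nat) (h : k < l.length) :
    ((l.take (k + 1)).map f).sum = ((l.take k).map f).sum + f (l.getD k []) := by
  rw [List.take_add_one, List.getElem?_eq_getElem h, List.map_append, List.sum_append]
  simp [List.getD_eq_getElem?_getD, List.getElem?_eq_getElem h]

-- a Python loop 'for i in range(N): … xs[i] …' with N ≤ len(xs) walks xs.take N
lemma pv_foldl_take {α β : Type} (xs : List α) (d : α) (f : β → α → β) (init : β)
    (N : Int) (h : N ≤ (xs.length : Int)) :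
    (PySem.List.pyRange 0 N 1).foldl (fun acc i => f acc (PySem.List.pyGetD xs i d)) init
    = (xs.take N.toNat).foldl f init := by
  by_cases h0 : 0 ≤ N
  · trans ((PySem.List.pyRange 0 N 1).foldl
        (fun acc i => f acc (PySem.List.pyGetD (xs.take N.toNat) i d)) init)
    · refine PySem.List.foldl_congr_mem _ _ _ _ ?_
      intro acc i hi
      rw [PySem.List.mem_pyRange_one] at hi
      rw [PySem.List.pyGetD_of_nonneg _ d hi.1, PySem.List.pyGetD_of_nonneg _ d hi.1,
          List.getD_eq_getElem?_getD, List.getD_eq_getElem?_getD,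
          List.getElem?_take_of_lt (by omega)]
    · set ys := xs.take N.toNat with hys
      have hlen : ((ys.length : Nat) : Int) = N := by rw [hys]; simp; omega
      rw [← hlen]
      exact PySem.List.foldl_pyRange_zero_pyGetD' ys d f init
  · rw [PySem.List.pyRange_one_eq_nil (by omega), show N.toNat = 0 by omega]
    simp

lemma pv_pyGetD_take {α : Type} (xs : List α) (d : α) (n : Nat) (k : Int)
    (h0 : 0 ≤ k) (h : k < (n : Int)) :
    PySem.List.pyGetD (xs.take n) k d = PySem.List.pyGetD xs k d := by
  rw [PySem.List.pyGetD_of_nonneg _ d h0, PySem.List.pyGetD_of_nonneg _ d h0,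
      List.getD_eq_getElem?_getD, List.getD_eq_getElem?_getD,
      List.getElem?_take_of_lt (by omega)]

-- a length-4 window sum as folded by A, as a difference of two prefix sums
lemma pv_window (row : List Int) (j : Int) (h0 : 0 ≤ j) (h4 : j + 4 ≤ (row.length : Int)) :
    PySem.List.pyGetD (pvPrefixes row) (j + 4) 0 - PySem.List.pyGetD (pvPrefixes row) j 0
    = (PySem.List.pyRange j (j + 4) 1).foldl
        (fun s k => s + PySem.List.pyGetD row k 0) 0 := by
  have hr : (PySem.List.pyRange j (j + 4) 1) = [j, j + 1, j + 2, j + 3] := by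
    rw [PySem.List.pyRange_one]
    have : (j + 4 - j).toNat = 4 := by omega
    rw [this]
    simp [List.range_succ]
  rw [hr]
  have hlen : j.toNat + 4 ≤ row.length := by omega
  have hget : ∀ t : Nat, t < 4 → PySem.List.pyGetD row (j + t) 0 = row.getD (j.toNat + t) 0 := by
    intro t ht
    rw [PySem.List.pyGetD_of_nonneg row 0 (by omega)]
    congr 1
    omega
  have e0 := hget 0 (by norm_num)
  have e1 := hget 1 (by norm_num)
  have e2 := hget 2 (by norm_num)
  have e3 := hget 3 (by norm_num)
  norm_num at e0 e1 e2 e3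
  rw [PySem.List.pyGetD_of_nonneg _ 0 (by omega), PySem.List.pyGetD_of_nonneg _ 0 h0]
  unfold pvPrefixes
  rw [PySem.List.getD_map_range _ _ _ _ (by omega), PySem.List.getD_map_range _ _ _ _ (by omega)]
  have h4' : (j + 4).toNat = j.toNat + 4 := by omega
  rw [h4']
  rw [pv_sum_take_succ row (j.toNat + 3) (by omega), pv_sum_take_succ row (j.toNat + 2) (by omega),
      pv_sum_take_succ row (j.toNat + 1) (by omega), pv_sum_take_succ row j.toNat (by omega)]
  simp only [List.foldl_cons, List.foldl_nil, e0, e1, e2, e3, List.getD_eq_getElem?_getD]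
  ring

lemma pv_colOf_step (rows : List (List Int)) (row : List Int) (m : Nat) :
    (List.range m).map (fun k => (pvColOf rows m).getD k 0 + row.getD k 0)
    = pvColOf (rows ++ [row]) m := by
  unfold pvColOf
  refine List.map_congr_left ?_
  intro k hk
  rw [List.mem_range] at hk
  rw [PySem.List.getD_map_range _ _ _ _ hk]
  simp

lemma pv_col_fold (rows : List (List Int)) (m : Nat) (Cacc : List (List Int)) (pre : List (List Int)) :
    rows.foldl (fun (C : List (List Int) × List Int) row =>
        (C.1 ++ [(List.range m).map (fun k => C.2.getD k 0 + row.getD k 0)],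
         (List.range m).map (fun k => C.2.getD k 0 + row.getD k 0))) (Cacc, pvColOf pre m)
    = (Cacc ++ (List.range rows.length).map (fun t => pvColOf (pre ++ rows.take (t + 1)) m),
       pvColOf (pre ++ rows) m) := by
  induction rows generalizing Cacc pre with
  | nil => simp
  | cons row rows ih =>
      simp only [List.foldl_cons, pv_colOf_step]
      have := ih (Cacc ++ [pvColOf (pre ++ [row]) m]) (pre ++ [row])
      rw [this]
      simp only [List.length_cons, List.range_succ_eq_map, List.map_cons, List.map_map,
        List.take_succ_cons, List.take_zero, List.append_assoc, List.singleton_append,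
        Function.comp_def]

lemma pv_colOf_nil (m : Nat) : pvColOf [] m = List.replicate m 0 := by
  unfold pvColOf
  simp [List.map_const']

-- a vertical length-4 window sum as a difference of two column-prefix entries
lemma pv_vwindow (arr : List (List Int)) (m : Nat) (i j : Int)
    (hi0 : 0 ≤ i) (hi : i + 4 ≤ (arr.length : Int)) (hj0 : 0 ≤ j) (hj : j < (m : Int)) :
    PySem.List.pyGetD (PySem.List.pyGetD
        ((List.range (arr.length + 1)).map (fun t => pvColOf (arr.take t) m)) (i + 4) []) j 0
    - PySem.List.pyGetD (PySem.List.pyGetD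
        ((List.range (arr.length + 1)).map (fun t => pvColOf (arr.take t) m)) i []) j 0
    = (PySem.List.pyRange i (i + 4) 1).foldl
        (fun s k => s + PySem.List.pyGetD (PySem.List.pyGetD arr k []) j 0) 0 := by
  have hr : (PySem.List.pyRange i (i + 4) 1) = [i, i + 1, i + 2, i + 3] := by
    rw [PySem.List.pyRange_one]
    have : (i + 4 - i).toNat = 4 := by omega
    rw [this]
    simp [List.range_succ]
  rw [hr]
  have hC : ∀ x : Int, 0 ≤ x → x ≤ (arr.length : Int) →
      PySem.List.pyGetD ((List.range (arr.length + 1)).map (fun t => pvColOf (arr.take t) m)) x []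
      = pvColOf (arr.take x.toNat) m := by
    intro x hx0 hx
    rw [PySem.List.pyGetD_of_nonneg _ [] hx0, PySem.List.getD_map_range _ _ _ _ (by omega)]
  rw [hC (i + 4) (by omega) (by omega), hC i hi0 (by omega)]
  have hcol : ∀ t : Nat, t ≤ arr.length →
      PySem.List.pyGetD (pvColOf (arr.take t) m) j 0
      = ((arr.take t).map (fun r => r.getD j.toNat 0)).sum := by
    intro t ht
    rw [PySem.List.pyGetD_of_nonneg _ 0 hj0]
    unfold pvColOf
    rw [PySem.List.getD_map_range _ _ _ _ (by omega)]
  rw [hcol (i + 4).toNat (by omega), hcol i.toNat (by omega)]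
  have h4' : (i + 4).toNat = i.toNat + 4 := by omega
  rw [h4']
  rw [pv_sum_map_take_succ arr _ (i.toNat + 3) (by omega), pv_sum_map_take_succ arr _ (i.toNat + 2) (by omega),
      pv_sum_map_take_succ arr _ (i.toNat + 1) (by omega), pv_sum_map_take_succ arr _ i.toNat (by omega)]
  have hget : ∀ t : Nat, t < 4 →
      PySem.List.pyGetD (PySem.List.pyGetD arr (i + t) []) j 0
      = (arr.getD (i.toNat + t) []).getD j.toNat 0 := by
    intro t ht
    rw [PySem.List.pyGetD_of_nonneg arr [] (by omega), PySem.List.pyGetD_of_nonneg _ 0 hj0]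
    congr 2
    omega
  have e0 := hget 0 (by norm_num)
  have e1 := hget 1 (by norm_num)
  have e2 := hget 2 (by norm_num)
  have e3 := hget 3 (by norm_num)
  norm_num at e0 e1 e2 e3
  simp only [List.foldl_cons, List.foldl_nil, e0, e1, e2, e3, List.getD_eq_getElem?_getD]
  ring

-- ===== VERDICT (by name: the statement is the Claim_ definition above) =====
theorem tetromino_I_spec : Claim_equal_tetromino_I := by
  intro N M arr _ hpre
  obtain ⟨hNlen, hrows⟩ := hpre
  unfold Spec_tetromino_I
  simp only [tetromino_I, tetromino_I_alt]
  by_cases hN0 : N ≤ 0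
  · rw [if_pos hN0, PySem.List.pyRange_one_eq_nil (show N ≤ 0 from hN0),
        PySem.List.pyRange_one_eq_nil (show N - 3 ≤ 0 by omega)]
    simp
  rw [if_neg hN0]
  -- characterize B's row-prefix table R
  have hR : (PySem.List.pyRange 0 N 1).foldl (fun R i =>
      R ++ [((PySem.List.pyRange 0 M 1).foldl
        (fun (p : List Int × Int) j => (p.1 ++ [p.2 + PySem.List.pyGetD (PySem.List.pyGetD arr i []) j 0],
                                        p.2 + PySem.List.pyGetD (PySem.List.pyGetD arr i []) j 0)) ([0], 0)).1]) []
      = (arr.take N.toNat).map (fun row => pvPrefixes (row.take M.toNat)) := by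
    rw [pv_foldl_take arr []
        (fun R row => R ++ [((PySem.List.pyRange 0 M 1).foldl
          (fun (p : List Int × Int) j => (p.1 ++ [p.2 + PySem.List.pyGetD row j 0],
                                          p.2 + PySem.List.pyGetD row j 0)) ([0], 0)).1]) [] N hNlen]
    rw [PySem.List.foldl_append_singleton_eq_map]
    simp only [List.nil_append]
    refine List.map_congr_left ?_
    intro row hrow
    rw [pv_foldl_take row 0
        (fun (p : List Int × Int) x => (p.1 ++ [p.2 + x], p.2 + x)) ([0], 0) M (hrows row hrow)]
    rw [pv_pfx_eq]
  rw [hR]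
  -- characterize B's column-prefix table C
  have hC : ((PySem.List.pyRange 0 N 1).foldl
      (fun (C : List (List Int) × List Int) i =>
        (C.1 ++ [(PySem.List.pyRange 0 M 1).map
          (fun j => PySem.List.pyGetD C.2 j 0 + PySem.List.pyGetD (PySem.List.pyGetD arr i []) j 0)],
         (PySem.List.pyRange 0 M 1).map
          (fun j => PySem.List.pyGetD C.2 j 0 + PySem.List.pyGetD (PySem.List.pyGetD arr i []) j 0)))
      ([List.replicate M.toNat 0], List.replicate M.toNat 0)).1
      = (List.range ((arr.take N.toNat).length + 1)).map
          (fun t => pvColOf ((arr.take N.toNat).take t) M.toNat) := by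
    rw [pv_foldl_take arr []
        (fun (C : List (List Int) × List Int) row =>
          (C.1 ++ [(PySem.List.pyRange 0 M 1).map
            (fun j => PySem.List.pyGetD C.2 j 0 + PySem.List.pyGetD row j 0)],
           (PySem.List.pyRange 0 M 1).map
            (fun j => PySem.List.pyGetD C.2 j 0 + PySem.List.pyGetD row j 0)))
        ([List.replicate M.toNat 0], List.replicate M.toNat 0) N hNlen]
    simp only [PySem.List.pyRange_one, Int.sub_zero, List.map_map, Function.comp_def,
      zero_add, PySem.List.pyGetD_natCast]
    rw [← pv_colOf_nil M.toNat]
    rw [pv_col_fold (arr.take N.toNat) M.toNat [pvColOf [] M.toNat] []]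
    simp only [List.nil_append, List.range_succ_eq_map, List.map_cons, List.map_map,
      Function.comp_def, List.take_zero, List.singleton_append]
  rw [hC]
  -- horizontal passes agree
  have hH : (PySem.List.pyRange 0 N 1).foldl (fun ans i =>
      (PySem.List.pyRange 0 (M - 3) 1).foldl (fun ans j =>
        max ans ((PySem.List.pyRange j (j + 4) 1).foldl
          (fun s k => s + PySem.List.pyGetD (PySem.List.pyGetD arr i []) k 0) 0)) ans) 0
      = (PySem.List.pyRange 0 N 1).foldl (fun ans i =>
      (PySem.List.pyRange 0 (M - 3) 1).foldl (fun ans j =>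
        max ans (PySem.List.pyGetD (PySem.List.pyGetD
            ((arr.take N.toNat).map (fun row => pvPrefixes (row.take M.toNat))) i []) (j + 4) 0
          - PySem.List.pyGetD (PySem.List.pyGetD
            ((arr.take N.toNat).map (fun row => pvPrefixes (row.take M.toNat))) i []) j 0)) ans) 0 := by
    rw [pv_foldl_take arr []
        (fun ans row => (PySem.List.pyRange 0 (M - 3) 1).foldl (fun ans j =>
          max ans ((PySem.List.pyRange j (j + 4) 1).foldl
            (fun s k => s + PySem.List.pyGetD row k 0) 0)) ans) 0 N hNlen]
    rw [pv_foldl_take ((arr.take N.toNat).map (fun row => pvPrefixes (row.take M.toNat))) []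
        (fun ans Ri => (PySem.List.pyRange 0 (M - 3) 1).foldl (fun ans j =>
          max ans (PySem.List.pyGetD Ri (j + 4) 0 - PySem.List.pyGetD Ri j 0)) ans) 0 N
        (by simp; omega)]
    rw [List.take_of_length_le
        (l := (arr.take N.toNat).map (fun row => pvPrefixes (row.take M.toNat)))
        (i := N.toNat) (by simp only [List.length_map, List.length_take]; omega)]
    rw [List.foldl_map]
    refine PySem.List.foldl_congr_mem _ _ _ 0 ?_
    intro ans row hrow
    have hMr : M ≤ (row.length : Int) := hrows row hrow
    refine PySem.List.foldl_congr_mem _ _ _ ans ?_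
    intro ans2 j hj
    rw [PySem.List.mem_pyRange_one] at hj
    rw [pv_window (row.take M.toNat) j hj.1 (by simp; omega)]
    congr 1
    refine PySem.List.foldl_congr_mem _ _ _ 0 ?_
    intro s k hk
    rw [PySem.List.mem_pyRange_one] at hk
    rw [pv_pyGetD_take row 0 M.toNat k (by omega) (by omega)]
  rw [← hH]
  -- vertical passes agree pointwise
  refine PySem.List.foldl_congr_mem _ _ _ _ ?_
  intro ans i hi
  rw [PySem.List.mem_pyRange_one] at hi
  refine PySem.List.foldl_congr_mem _ _ _ ans ?_
  intro ans2 j hj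
  rw [PySem.List.mem_pyRange_one] at hj
  rw [pv_vwindow (arr.take N.toNat) M.toNat i j hi.1 (by simp; omega) hj.1 (by omega)]
  congr 1
  refine PySem.List.foldl_congr_mem _ _ _ 0 ?_
  intro s k hk
  rw [PySem.List.mem_pyRange_one] at hk
  rw [pv_pyGetD_take arr [] N.toNat k (by omega) (by omega)]
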